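-- pv_equiv track=rewrite | github.com/LBruyne/ZJU-SE-CourseMaterial | 大三秋冬学期/软件质量测试/Homework/作业3/3180106071_刘轩铭_组合测试作业/code/AETG-longce/main.py | calc_covered_ucp_num_for_next_value
-- ===== SOURCE A (Python) =====
-- def calc_covered_ucp_num_for_next_value(selected_params, selected_params_num, wise_num, f, vi, uncovered_pairs):
--     elem_num = len(selected_params)
--     subset_num = 2 ** elem_num
--     total_cover_ucp_num = 0
--     for i in range(subset_num):
--         subset = []
--         subset_len = 0
--         for j in range(elem_num):
--             if ((i >> j) % 2) == True:
--                 subset.append(selected_params[j])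
--                 subset_len += 1
--             else:
--                 subset.append(-1)
--         if subset_len == wise_num-1:
--             subset[f] = vi
--             if tuple(subset) in uncovered_pairs:
--                 total_cover_ucp_num += 1
--     return total_cover_ucp_num
-- ===== SOURCE B (Python) =====
-- def calc_covered_ucp_num_for_next_value(selected_params, selected_params_num, wise_num, f, vi, uncovered_pairs):
--     n = len(selected_params)
--     k = wise_num - 1
--     if k < 0 or k > n:
--         return 0
--
--     def combos(idxs, k):
--         # all k-element ascending index selections from idxs
--         if k == 0:
--             return [[]]
--         if not idxs:
--             return []
--         first, rest = idxs[0], idxs[1:]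
--         return [[first] + c for c in combos(rest, k - 1)] + combos(rest, k)
--
--     count = 0
--     for S in combos(list(range(n)), k):
--         pattern = [selected_params[j] if j in S else -1 for j in range(n)]
--         pattern[f] = vi
--         if tuple(pattern) in uncovered_pairs:
--             count += 1
--     return count
-- ===== Notes on version B (the rewrite author's own statement) =====
-- stated objective: alternative
-- what changed: B enumerates the (wise_num-1)-element index combinations directly and tests each resulting pattern, instead of scanning all 2^n bitmasks and filtering them by popcount as A does; intended as faster (measured 3.0x at n=16) but both time out at the largest size when wise_num is large, so no speed is claimed.
import Mathlib
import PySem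

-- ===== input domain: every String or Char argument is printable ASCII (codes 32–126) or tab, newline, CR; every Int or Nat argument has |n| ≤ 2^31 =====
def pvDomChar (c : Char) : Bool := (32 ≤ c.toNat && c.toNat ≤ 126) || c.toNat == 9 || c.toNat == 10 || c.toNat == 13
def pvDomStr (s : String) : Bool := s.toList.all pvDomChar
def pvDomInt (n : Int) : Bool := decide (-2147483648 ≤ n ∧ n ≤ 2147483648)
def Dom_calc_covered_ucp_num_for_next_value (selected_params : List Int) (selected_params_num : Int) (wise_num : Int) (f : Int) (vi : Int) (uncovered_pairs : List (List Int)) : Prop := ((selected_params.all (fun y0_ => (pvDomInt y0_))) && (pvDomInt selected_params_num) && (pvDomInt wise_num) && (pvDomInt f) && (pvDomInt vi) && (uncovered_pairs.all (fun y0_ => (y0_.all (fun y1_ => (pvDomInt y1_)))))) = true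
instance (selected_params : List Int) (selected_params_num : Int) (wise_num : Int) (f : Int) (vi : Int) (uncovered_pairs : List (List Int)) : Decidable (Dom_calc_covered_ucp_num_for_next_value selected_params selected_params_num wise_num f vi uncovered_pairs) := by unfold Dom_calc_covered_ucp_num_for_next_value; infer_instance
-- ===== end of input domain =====

-- B enumerates the (wise_num-1)-element index combinations directly instead of scanning all
-- 2^n bitmasks and filtering them by popcount (intended as faster; a timing run measured
-- 3.0x at n=16 but both time out at n=64 when wise_num is large, so no speed is claimed).

-- ===== PORT A =====
-- Python 'l[f] = v' with a possibly negative index f (out-of-range raises IndexError: excluded by Pre_)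
def pvSetIdx (l : List Int) (f : Int) (v : Int) : List Int :=
  if f < 0 then l.set (f + l.length).toNat v else l.set f.toNat v

def calc_covered_ucp_num_for_next_value (selected_params : List Int) (selected_params_num : Int) (wise_num : Int) (f : Int) (vi : Int) (uncovered_pairs : List (List Int)) : Int :=
  let elem_num := selected_params.length
  let subset_num := 2 ^ elem_num
  (List.range subset_num).foldl (fun total_cover_ucp_num i =>
    let st := (List.range elem_num).foldl
      (fun (st : List Int × Int) j =>
        if (i >>> j) % 2 == 1 then (st.1 ++ [selected_params.getD j 0], st.2 + 1)
        else (st.1 ++ [-1], st.2))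
      ([], (0 : Int))
    if st.2 == wise_num - 1 then
      -- subset[f] = vi; then 'tuple(subset) in uncovered_pairs' (uncovered_pairs is a set of tuples)
      let subset := pvSetIdx st.1 f vi
      if subset ∈ uncovered_pairs then total_cover_ucp_num + 1 else total_cover_ucp_num
    else total_cover_ucp_num) 0

-- ===== PORT B =====
-- all k-element ascending selections from the index list (Source B's combos helper)
def pvCombos : List Nat → Nat → List (List Nat)
  | _, 0 => [[]]
  | [], _ + 1 => []
  | first :: rest, k + 1 =>
      ((pvCombos rest k).map (fun c => first :: c)) ++ pvCombos rest (k + 1)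

def calc_covered_ucp_num_for_next_value_alt (selected_params : List Int) (selected_params_num : Int) (wise_num : Int) (f : Int) (vi : Int) (uncovered_pairs : List (List Int)) : Int :=
  let n := selected_params.length
  if wise_num - 1 < 0 ∨ (n : Int) < wise_num - 1 then 0
  else
    (pvCombos (List.range n) (wise_num - 1).toNat).foldl
      (fun count S =>
        let pattern := pvSetIdx ((List.range n).map (fun j => if S.contains j then selected_params.getD j 0 else -1)) f vi
        if pattern ∈ uncovered_pairs then count + 1 else count) 0

-- ===== PRECONDITION & SPEC =====
-- Pre_ excludes exactly the inputs where A raises IndexError at 'subset[f] = vi': some mask has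
-- popcount wise_num-1 (i.e. 0 ≤ wise_num-1 ≤ len(selected_params)) while f is outside [-n, n).
def Pre_calc_covered_ucp_num_for_next_value (selected_params : List Int) (selected_params_num : Int) (wise_num : Int) (f : Int) (vi : Int) (uncovered_pairs : List (List Int)) : Prop :=
  (wise_num - 1 < 0 ∨ (selected_params.length : Int) < wise_num - 1) ∨
  (-(selected_params.length : Int) ≤ f ∧ f < (selected_params.length : Int))
instance (selected_params : List Int) (selected_params_num : Int) (wise_num : Int) (f : Int) (vi : Int) (uncovered_pairs : List (List Int)) : Decidable (Pre_calc_covered_ucp_num_for_next_value selected_params selected_params_num wise_num f vi uncovered_pairs) := by unfold Pre_calc_covered_ucp_num_for_next_value; infer_instance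
def pvWitness_calc_covered_ucp_num_for_next_value : List Int × Int × Int × Int × Int × List (List Int) := ([5], 1, 2, 0, 7, [[7]])

def Spec_calc_covered_ucp_num_for_next_value (selected_params : List Int) (selected_params_num : Int) (wise_num : Int) (f : Int) (vi : Int) (uncovered_pairs : List (List Int)) (out : Int) : Prop := out = calc_covered_ucp_num_for_next_value_alt selected_params selected_params_num wise_num f vi uncovered_pairs
instance (selected_params : List Int) (selected_params_num : Int) (wise_num : Int) (f : Int) (vi : Int) (uncovered_pairs : List (List Int)) (out : Int) : Decidable (Spec_calc_covered_ucp_num_for_next_value selected_params selected_params_num wise_num f vi uncovered_pairs out) := by unfold Spec_calc_covered_ucp_num_for_next_value; infer_instance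

-- ===== CLAIM (what is proved, stated in full; the proofs are below) =====
def Claim_equal_calc_covered_ucp_num_for_next_value : Prop := ∀ (selected_params : List Int) (selected_params_num : Int) (wise_num : Int) (f : Int) (vi : Int) (uncovered_pairs : List (List Int)), Dom_calc_covered_ucp_num_for_next_value selected_params selected_params_num wise_num f vi uncovered_pairs → Pre_calc_covered_ucp_num_for_next_value selected_params selected_params_num wise_num f vi uncovered_pairs → Spec_calc_covered_ucp_num_for_next_value selected_params selected_params_num wise_num f vi uncovered_pairs (calc_covered_ucp_num_for_next_value selected_params selected_params_num wise_num f vi uncovered_pairs)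

-- ===== LEMMAS AND PROOFS =====

-- the candidate pattern a set S of selected indices produces (proof abbreviation)
def pvPat (sp : List Int) (f vi : Int) (S : List Nat) : List Int :=
  pvSetIdx ((List.range sp.length).map (fun j => if S.contains j then sp.getD j 0 else -1)) f vi

-- the Bool predicate A effectively counts, as a function of the selected index set
def pvQ (sp : List Int) (w f vi : Int) (up : List (List Int)) (S : List Nat) : Bool :=
  decide (((S.length : Int) = w - 1) ∧ pvPat sp f vi S ∈ up)

-- A's inner loop builds the masked pattern and the popcount
theorem inner_fold (g : Nat → Int) (p : Nat → Bool) :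
    ∀ (l : List Nat) (l0 : List Int) (c0 : Int),
      l.foldl (fun (st : List Int × Int) j =>
        if p j then (st.1 ++ [g j], st.2 + 1) else (st.1 ++ [-1], st.2)) (l0, c0)
      = (l0 ++ l.map (fun j => if p j then g j else -1), c0 + (l.countP p : Int)) := by
  intro l
  induction l with
  | nil => intro l0 c0; simp
  | cons a t ih =>
    intro l0 c0
    rw [List.foldl_cons, List.countP_cons]
    by_cases h : p a
    · simp [h, ih]; push_cast; ring
    · simp [h, ih]

-- bits of 2^n + i below position n agree with the bits of i
theorem bit_low (n i j : Nat) (hj : j < n) : ((2 ^ n + i) >>> j) % 2 = (i >>> j) % 2 := by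
  rw [Nat.shiftRight_eq_div_pow, Nat.shiftRight_eq_div_pow]
  have hsplit : 2 ^ n + i = i + 2 ^ (n - j - 1) * 2 * 2 ^ j := by
    have : 2 ^ (n - j - 1) * 2 * 2 ^ j = 2 ^ n := by
      rw [mul_assoc, mul_comm 2 (2 ^ j), ← pow_succ, ← pow_add]
      congr 1
      omega
    omega
  rw [hsplit, Nat.add_mul_div_right _ _ (Nat.two_pow_pos j), Nat.add_mul_mod_self_right]

-- bit n of 2^n + i is 1, bit n of i is 0, for i < 2^n
theorem bit_high (n i : Nat) (h : i < 2 ^ n) : ((2 ^ n + i) >>> n) % 2 = 1 := by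
  rw [Nat.shiftRight_eq_div_pow, Nat.add_comm, Nat.add_div_right _ (Nat.two_pow_pos n),
    Nat.div_eq_of_lt h]

theorem bit_top_zero (n i : Nat) (h : i < 2 ^ n) : (i >>> n) % 2 = 0 := by
  rw [Nat.shiftRight_eq_div_pow, Nat.div_eq_of_lt h]

-- counting over all 2^n bitmasks = counting over all sublists of range n
theorem mask_count : ∀ (n : Nat) (Q : List Nat → Bool),
    (List.range (2 ^ n)).countP
      (fun i => Q ((List.range n).filter (fun j => (i >>> j) % 2 == 1)))
    = (List.range n).sublists.countP Q := by
  intro n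
  induction n with
  | zero => intro Q; simp
  | succ n ih =>
    intro Q
    have h2 : 2 ^ (n + 1) = 2 ^ n + 2 ^ n := by rw [pow_succ]; omega
    have hr : List.range (2 ^ n + 2 ^ n)
        = List.range (2 ^ n) ++ (List.range (2 ^ n)).map (fun x => 2 ^ n + x) := by
      rw [List.range_add]
    rw [h2, hr, List.countP_append, List.countP_map]
    simp only [Function.comp_def]
    have e1 : (List.range (2 ^ n)).countP
        (fun i => Q ((List.range (n+1)).filter (fun j => (i >>> j) % 2 == 1)))
        = (List.range (2 ^ n)).countP
        (fun i => Q ((List.range n).filter (fun j => (i >>> j) % 2 == 1))) := by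
      apply List.countP_congr
      intro i hi
      have hi' : i < 2 ^ n := List.mem_range.mp hi
      have hb : ((i >>> n) % 2 == 1) = false := by
        rw [bit_top_zero n i hi']; rfl
      rw [List.range_succ, List.filter_append]
      simp [hb]
    have e2 : (List.range (2 ^ n)).countP
        (fun i => Q ((List.range (n+1)).filter (fun j => ((2 ^ n + i) >>> j) % 2 == 1)))
        = (List.range (2 ^ n)).countP
        (fun i => (fun S => Q (S ++ [n])) ((List.range n).filter (fun j => (i >>> j) % 2 == 1))) := by
      apply List.countP_congr
      intro i hi
      have hi' : i < 2 ^ n := List.mem_range.mp hi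
      have hb : (((2 ^ n + i) >>> n) % 2 == 1) = true := by
        rw [bit_high n i hi']; rfl
      have hfil : (List.range n).filter (fun j => ((2 ^ n + i) >>> j) % 2 == 1)
          = (List.range n).filter (fun j => (i >>> j) % 2 == 1) := by
        apply List.filter_congr
        intro j hj
        rw [bit_low n i j (List.mem_range.mp hj)]
      rw [List.range_succ, List.filter_append, hfil]
      simp [hb]
    rw [e1, ih, e2, ih (fun S => Q (S ++ [n])), List.range_succ, List.sublists_concat,
      List.countP_append, List.countP_map]
    rfl

-- A's loop counts pvQ over the bit-index sets of all masks
theorem A_eq_countP (sp : List Int) (spn w f vi : Int) (up : List (List Int)) :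
    calc_covered_ucp_num_for_next_value sp spn w f vi up
    = ((List.range (2 ^ sp.length)).countP
        (fun i => pvQ sp w f vi up ((List.range sp.length).filter (fun j => (i >>> j) % 2 == 1))) : Int) := by
  show (List.range (2 ^ sp.length)).foldl (fun total_cover_ucp_num i =>
      let st := (List.range sp.length).foldl
        (fun (st : List Int × Int) j =>
          if (i >>> j) % 2 == 1 then (st.1 ++ [sp.getD j 0], st.2 + 1)
          else (st.1 ++ [-1], st.2))
        ([], (0 : Int))
      if st.2 == w - 1 then
        let subset := pvSetIdx st.1 f vi
        if subset ∈ up then total_cover_ucp_num + 1 else total_cover_ucp_num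
      else total_cover_ucp_num) 0 = _
  have hfun : (fun (total_cover_ucp_num : Int) (i : Nat) =>
      let st := (List.range sp.length).foldl
        (fun (st : List Int × Int) j =>
          if (i >>> j) % 2 == 1 then (st.1 ++ [sp.getD j 0], st.2 + 1)
          else (st.1 ++ [-1], st.2))
        ([], (0 : Int))
      if st.2 == w - 1 then
        let subset := pvSetIdx st.1 f vi
        if subset ∈ up then total_cover_ucp_num + 1 else total_cover_ucp_num
      else total_cover_ucp_num)
      = (fun (total : Int) (i : Nat) =>
        if pvQ sp w f vi up ((List.range sp.length).filter (fun j => (i >>> j) % 2 == 1))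
        then total + 1 else total) := by
    funext total i
    simp only [inner_fold (fun j => sp.getD j 0) (fun j => (i >>> j) % 2 == 1),
      List.nil_append, zero_add]
    have hmap : (List.range sp.length).map (fun j => if (i >>> j) % 2 == 1 then sp.getD j 0 else -1)
        = (List.range sp.length).map (fun j =>
            if ((List.range sp.length).filter (fun j => (i >>> j) % 2 == 1)).contains j
            then sp.getD j 0 else -1) := by
      apply List.map_congr_left
      intro j hj
      by_cases h : ((i >>> j) % 2 == 1) = true
      · simp [h, List.mem_filter, hj]
      · simp [h, List.mem_filter]
    rw [hmap]
    unfold pvQ pvPat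
    rw [List.countP_eq_length_filter]
    by_cases hl : ((((List.range sp.length).filter (fun j => (i >>> j) % 2 == 1)).length : Int) = w - 1)
    · by_cases hm : pvSetIdx ((List.range sp.length).map (fun j =>
          if ((List.range sp.length).filter (fun j => (i >>> j) % 2 == 1)).contains j
          then sp.getD j 0 else -1)) f vi ∈ up
      · simp [hl, hm]
      · simp [hl, hm]
    · simp [hl]
  rw [hfun, PySem.List.foldl_if_add_one, zero_add]

-- pvCombos l k lists exactly the length-k sublists of l
theorem mem_pvCombos : ∀ (l : List Nat) (k : Nat) (S : List Nat),
    S ∈ pvCombos l k ↔ S.Sublist l ∧ S.length = k := by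
  intro l
  induction l with
  | nil =>
    intro k S
    cases k with
    | zero =>
      constructor
      · intro h
        have hS : S = [] := by simpa [pvCombos] using h
        subst hS; exact ⟨List.Sublist.refl _, rfl⟩
      · rintro ⟨_, hlen⟩
        have hS : S = [] := List.length_eq_zero_iff.mp hlen
        subst hS; simp [pvCombos]
    | succ k =>
      constructor
      · intro h; simp [pvCombos] at h
      · rintro ⟨hsub, hlen⟩
        have hS : S = [] := List.sublist_nil.mp hsub
        subst hS; simp at hlen
  | cons a t ih =>
    intro k S
    cases k with
    | zero =>
      constructor
      · intro h
        have hS : S = [] := by simpa [pvCombos] using h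
        subst hS; exact ⟨List.nil_sublist _, rfl⟩
      · rintro ⟨_, hlen⟩
        have hS : S = [] := List.length_eq_zero_iff.mp hlen
        subst hS; simp [pvCombos]
    | succ k =>
      simp only [pvCombos, List.mem_append, List.mem_map, ih]
      constructor
      · rintro (⟨c, ⟨hsub, hlen⟩, rfl⟩ | ⟨hsub, hlen⟩)
        · exact ⟨List.cons_sublist_cons.mpr hsub, by simp [hlen]⟩
        · exact ⟨hsub.cons _, hlen⟩
      · rintro ⟨hsub, hlen⟩
        rcases List.sublist_cons_iff.mp hsub with h | ⟨r, rfl, hr⟩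
        · exact Or.inr ⟨h, hlen⟩
        · exact Or.inl ⟨r, ⟨hr, by simpa using hlen⟩, rfl⟩

theorem nodup_pvCombos : ∀ (l : List Nat), l.Nodup → ∀ k, (pvCombos l k).Nodup := by
  intro l
  induction l with
  | nil =>
    intro _ k
    cases k with
    | zero => simp [pvCombos]
    | succ k => simp [pvCombos]
  | cons a t ih =>
    intro hnd k
    have hat : a ∉ t := (List.nodup_cons.mp hnd).1
    have hndt : t.Nodup := (List.nodup_cons.mp hnd).2
    cases k with
    | zero => simp [pvCombos]
    | succ k =>
      rw [pvCombos]
      apply List.Nodup.append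
      · exact (ih hndt k).map (fun x y h => by injection h)
      · exact ih hndt (k + 1)
      · intro S hS1 hS2
        rcases List.mem_map.mp hS1 with ⟨c, _, rfl⟩
        have : (a :: c).Sublist t := ((mem_pvCombos t (k+1) (a :: c)).mp hS2).1
        exact hat (this.subset (List.mem_cons_self))

theorem pvCombos_perm (l : List Nat) (hl : l.Nodup) (k : Nat) :
    (pvCombos l k).Perm (l.sublists.filter (fun S => S.length == k)) := by
  apply List.perm_of_nodup_nodup_toFinset_eq (nodup_pvCombos l hl k)
    ((List.nodup_sublists.mpr hl).filter _)
  ext S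
  simp [mem_pvCombos, List.mem_filter, List.mem_sublists, and_comm]

-- B's loop counts pattern membership over the combinations (guard already passed)
theorem B_eq_countP (sp : List Int) (spn w f vi : Int) (up : List (List Int))
    (hg : ¬ (w - 1 < 0 ∨ (sp.length : Int) < w - 1)) :
    calc_covered_ucp_num_for_next_value_alt sp spn w f vi up
    = ((pvCombos (List.range sp.length) (w - 1).toNat).countP
        (fun S => decide (pvPat sp f vi S ∈ up)) : Int) := by
  unfold calc_covered_ucp_num_for_next_value_alt
  rw [if_neg hg]
  have hfun : (fun (count : Int) (S : List Nat) =>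
      let pattern := pvSetIdx ((List.range sp.length).map (fun j => if S.contains j then sp.getD j 0 else -1)) f vi
      if pattern ∈ up then count + 1 else count)
      = (fun (count : Int) (S : List Nat) => if pvPat sp f vi S ∈ up then count + 1 else count) := rfl
  rw [hfun, PySem.List.foldl_ite_add_one, zero_add]

-- ===== VERDICT (by name: the statement is the Claim_ definition above) =====
theorem calc_covered_ucp_num_for_next_value_spec : Claim_equal_calc_covered_ucp_num_for_next_value := by
  intro sp spn w f vi up _hdom _hpre
  show calc_covered_ucp_num_for_next_value sp spn w f vi up
      = calc_covered_ucp_num_for_next_value_alt sp spn w f vi up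
  rw [A_eq_countP, mask_count sp.length (pvQ sp w f vi up)]
  by_cases hg : (w - 1 < 0 ∨ (sp.length : Int) < w - 1)
  · unfold calc_covered_ucp_num_for_next_value_alt
    rw [if_pos hg]
    have : (List.range sp.length).sublists.countP (pvQ sp w f vi up) = 0 := by
      rw [List.countP_eq_zero]
      intro S hS
      have hle : S.length ≤ sp.length := by
        simpa using (List.mem_sublists.mp hS).length_le
      unfold pvQ
      simp only [decide_eq_true_eq, not_and]
      intro hlen _
      omega
    rw [this]; rfl
  · rw [B_eq_countP sp spn w f vi up hg,
      (pvCombos_perm (List.range sp.length) (List.nodup_range) ((w - 1).toNat)).countP_eq,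
      List.countP_filter]
    congr 1
    apply List.countP_congr
    intro S hS
    unfold pvQ
    by_cases hm : pvPat sp f vi S ∈ up <;> by_cases hl : S.length = (w - 1).toNat <;>
      simp [hm, hl, beq_iff_eq] <;> omega
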